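-- pv_equiv track=rewrite | github.com/simsang1l/Programmers | python/level2/다시보기/할인_행사.py | solution
-- ===== SOURCE A (Python) =====
-- from collections import Counter
--
-- def solution(want, number, discount):
--     answer = 0
--     want_count = Counter({w: n for w, n in zip(want, number)})
--     current_count = Counter(discount[:10])
--
--     # 초기 10일간의 할인 제품 상태 검사
--     if all(current_count[w] >= want_count[w] for w in want_count):
--         answer += 1
--
--     # 슬라이딩 윈도우로 한 칸씩 이동하며 검사
--     for i in range(10, len(discount)):
--         # 윈도우의 오른쪽 끝 추가
--         current_count[discount[i]] += 1
--         # 윈도우의 왼쪽 끝 제거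
--         current_count[discount[i - 10]] -= 1
--         if current_count[discount[i - 10]] == 0:
--             del current_count[discount[i - 10]]
--
--         # 현재 상태 검사
--         if all(current_count[w] >= want_count[w] for w in want_count):
--             answer += 1
--
--     return answer
-- ===== SOURCE B (Python) =====
-- def solution(want, number, discount):
--     # O(n + k): keep per-item counts for wanted items only and an incremental
--     # tally of how many wanted items are currently satisfied; each window
--     # shift is O(1) instead of re-scanning all wanted items.
--     need = dict(zip(want, number))
--     total = len(need)
--     cnt = dict.fromkeys(need, 0)
--     satisfied = sum(1 for w in need if need[w] <= 0)
--
--     def add(x):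
--         nonlocal satisfied
--         if x in cnt:
--             cnt[x] += 1
--             if cnt[x] == need[x]:
--                 satisfied += 1
--
--     def remove(x):
--         nonlocal satisfied
--         if x in cnt:
--             if cnt[x] == need[x]:
--                 satisfied -= 1
--             cnt[x] -= 1
--
--     for x in discount[:10]:
--         add(x)
--     answer = 1 if satisfied == total else 0
--     for i in range(10, len(discount)):
--         add(discount[i])
--         remove(discount[i - 10])
--         if satisfied == total:
--             answer += 1
--     return answer
-- ===== Notes on version B (the rewrite author's own statement) =====
-- stated objective: faster
-- what changed: Instead of re-scanning every wanted item for each window (all(...) per shift), B maintains per-wanted-item counts plus an incrementally updated tally of how many wanted items are currently satisfied, so each window shift is O(1).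
import Mathlib
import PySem

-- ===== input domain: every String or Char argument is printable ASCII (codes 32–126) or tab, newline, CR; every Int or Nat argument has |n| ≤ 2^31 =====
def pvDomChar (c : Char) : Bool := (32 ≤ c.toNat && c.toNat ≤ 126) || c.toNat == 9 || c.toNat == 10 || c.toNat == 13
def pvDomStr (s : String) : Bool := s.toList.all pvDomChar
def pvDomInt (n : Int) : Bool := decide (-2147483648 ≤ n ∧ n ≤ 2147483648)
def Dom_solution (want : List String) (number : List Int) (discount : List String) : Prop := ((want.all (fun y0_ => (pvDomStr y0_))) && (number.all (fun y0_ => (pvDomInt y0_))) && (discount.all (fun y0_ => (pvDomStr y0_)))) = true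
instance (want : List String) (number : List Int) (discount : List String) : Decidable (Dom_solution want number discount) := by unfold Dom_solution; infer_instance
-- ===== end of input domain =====

-- B replaces A's per-window rescan of all wanted items by an incrementally
-- maintained count of currently-satisfied wanted items (alternative algorithm).

-- ===== PORT A =====
-- loop body of A's sliding-window for-loop (named so the fold is readable)
def aStep (want_count : PySem.Dict String Int) (discount : List String)
    (st : Int × PySem.Dict String Int) (i : Int) : Int × PySem.Dict String Int :=
  -- current_count[discount[i]] += 1
  let cc := st.2.modify (PySem.List.pyGetD discount i "") 0 (· + 1)
  -- current_count[discount[i-10]] -= 1 ; del it if it became 0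
  let y := PySem.List.pyGetD discount (i - 10) ""
  let cc := cc.modify y 0 (· - 1)
  let cc := if cc.getD y 0 == 0 then cc.erase y else cc
  -- if all(current_count[w] >= want_count[w] for w in want_count): answer += 1
  if want_count.keys.all (fun w => decide (want_count.getD w 0 ≤ cc.getD w 0)) then
    (st.1 + 1, cc)
  else
    (st.1, cc)

def solution (want : List String) (number : List Int) (discount : List String) : Int :=
  let want_count : PySem.Dict String Int :=
    (want.zip number).foldl (fun d p => d.insert p.1 p.2) PySem.Dict.empty
  let current_count : PySem.Dict String Int :=
    PySem.Dict.counter (PySem.List.slice discount none (some 10))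
  let answer : Int :=
    if want_count.keys.all (fun w => decide (want_count.getD w 0 ≤ current_count.getD w 0)) then 1
    else 0
  let st := (PySem.List.pyRange 10 discount.length 1).foldl (aStep want_count discount)
    (answer, current_count)
  st.1

-- ===== PORT B =====
-- add(x): count the incoming item; satisfied crosses the threshold iff cnt hits need
def altAdd (need : PySem.Dict String Int) (st : PySem.Dict String Int × Int) (x : String) :
    PySem.Dict String Int × Int :=
  if st.1.contains x then
    let cnt := st.1.modify x 0 (· + 1)
    if cnt.getD x 0 == need.getD x 0 then (cnt, st.2 + 1) else (cnt, st.2)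
  else st

-- remove(x): uncount the outgoing item; satisfied drops iff cnt leaves need
def altRemove (need : PySem.Dict String Int) (st : PySem.Dict String Int × Int) (x : String) :
    PySem.Dict String Int × Int :=
  if st.1.contains x then
    let s := if st.1.getD x 0 == need.getD x 0 then st.2 - 1 else st.2
    (st.1.modify x 0 (· - 1), s)
  else st

-- loop body of B's sliding-window for-loop
def bStep (need : PySem.Dict String Int) (total : Int) (discount : List String)
    (acc : Int × (PySem.Dict String Int × Int)) (i : Int) :
    Int × (PySem.Dict String Int × Int) :=
  let st := altAdd need acc.2 (PySem.List.pyGetD discount i "")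
  let st := altRemove need st (PySem.List.pyGetD discount (i - 10) "")
  (acc.1 + (if st.2 == total then 1 else 0), st)

def solution_alt (want : List String) (number : List Int) (discount : List String) : Int :=
  let need : PySem.Dict String Int :=
    (want.zip number).foldl (fun d p => d.insert p.1 p.2) PySem.Dict.empty
  let total : Int := need.size
  let cnt0 : PySem.Dict String Int :=
    need.keys.foldl (fun d w => d.insert w (0 : Int)) PySem.Dict.empty
  let sat0 : Int := ((need.keys.filter (fun w => decide (need.getD w 0 ≤ 0))).length : Int)
  let st := (PySem.List.slice discount none (some 10)).foldl (altAdd need) (cnt0, sat0)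
  let answer : Int := if st.2 == total then 1 else 0
  let fin := (PySem.List.pyRange 10 discount.length 1).foldl (bStep need total discount)
    (answer, st)
  fin.1

-- ===== PRECONDITION & SPEC =====
def Spec_solution (want : List String) (number : List Int) (discount : List String) (out : Int) : Prop := out = solution_alt want number discount
instance (want : List String) (number : List Int) (discount : List String) (out : Int) : Decidable (Spec_solution want number discount out) := by unfold Spec_solution; infer_instance

-- ===== CLAIM (what is proved, stated in full; the proofs are below) =====
def Claim_equal_solution : Prop := ∀ (want : List String) (number : List Int) (discount : List String), Dom_solution want number discount → Spec_solution want number discount (solution want number discount)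

-- ===== LEMMAS AND PROOFS =====

-- The relational invariant: B's cnt agrees with A's window counter on the
-- wanted keys, and B's sat counts the wanted keys currently satisfied.
def SWInv (need cc cnt : PySem.Dict String Int) (sat : Int) : Prop :=
  cnt.keys = need.keys ∧
  (∀ w ∈ need.keys, cc.getD w 0 = cnt.getD w 0) ∧
  sat = (need.keys.countP (fun w => decide (need.getD w 0 ≤ cnt.getD w 0)) : Int)

lemma get?_erase (d : PySem.Dict String Int) (y w : String) :
    (d.erase y).get? w = if w = y then none else d.get? w := by
  rcases eq_or_ne w y with h | h
  · subst h
    simp only [PySem.Dict.erase, PySem.Dict.get?]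
    rw [List.find?_filter]
    simp [List.find?_eq_none]
  · simp only [if_neg h, PySem.Dict.erase, PySem.Dict.get?]
    rw [List.find?_filter]
    have hp : (fun a : String × ℤ => decide ((!(a.1 == y)) = true ∧ (a.1 == w) = true))
        = (fun p : String × ℤ => p.1 == w) := by
      funext a
      by_cases h2 : a.1 = w
      · subst h2; simp [h]
      · simp [h2]
    rw [hp]

lemma getD_erase (d : PySem.Dict String Int) (y w : String) :
    (d.erase y).getD w 0 = if w = y then 0 else d.getD w 0 := by
  simp [PySem.Dict.getD_eq_get?_getD, get?_erase]
  split <;> rfl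

lemma countP_change (ks : List String) (hnd : ks.Nodup) (p q : String → Bool) (x : String)
    (h : ∀ u ∈ ks, u ≠ x → p u = q u) :
    (ks.countP q : Int) = (ks.countP p : Int) +
      (if x ∈ ks then (if q x then 1 else 0) - (if p x then 1 else 0) else 0) := by
  induction ks with
  | nil => simp
  | cons a ks ih =>
    rcases List.nodup_cons.mp hnd with ⟨hax, hnd'⟩
    by_cases hx : a = x
    · subst hx
      have hpq : ks.countP p = ks.countP q :=
        List.countP_congr (fun u hu => by
          rw [h u (List.mem_cons_of_mem _ hu) (fun he => hax (he ▸ hu))])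
      simp only [List.countP_cons, List.mem_cons, true_or, if_pos, hpq]
      push_cast
      split_ifs <;> omega
    · have hih := ih hnd' (fun u hu hux => h u (List.mem_cons_of_mem _ hu) hux)
      have hpa : p a = q a := h a (List.mem_cons_self) hx
      simp only [List.countP_cons, List.mem_cons]
      have : (x ∈ ks ∨ x = a) ↔ x ∈ ks := by
        constructor
        · rintro (h1 | h1); exact h1; exact absurd h1.symm hx
        · exact Or.inl
      push_cast
      rw [hpa]
      split_ifs with h1 h2 h2 <;> simp_all

lemma add_rel (need cc cnt : PySem.Dict String Int) (sat : Int) (x : String)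
    (hnd : need.keys.Nodup) (h : SWInv need cc cnt sat) :
    SWInv need (cc.modify x 0 (· + 1)) (altAdd need (cnt, sat) x).1 (altAdd need (cnt, sat) x).2 := by
  obtain ⟨hk, hw, hs⟩ := h
  by_cases hc : cnt.contains x = true
  · have hx : x ∈ need.keys := hk ▸ (PySem.Dict.contains_iff_mem_keys cnt x).mp hc
    have hkeys : (cnt.modify x 0 (· + 1)).keys = need.keys := by
      rw [PySem.Dict.keys_modify, PySem.Dict.keys_insert_of_contains _ _ hc, hk]
    have hpt : ∀ w ∈ need.keys,
        (cc.modify x 0 (· + 1)).getD w 0 = (cnt.modify x 0 (· + 1)).getD w 0 := by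
      intro w hwk
      rw [PySem.Dict.getD_modify, PySem.Dict.getD_modify]
      split_ifs with he
      · rw [hw x hx]
      · exact hw w hwk
    have hsat : ((if (cnt.modify x 0 (· + 1)).getD x 0 == need.getD x 0 then sat + 1 else sat) : Int)
        = (need.keys.countP (fun w => decide (need.getD w 0 ≤ (cnt.modify x 0 (· + 1)).getD w 0)) : Int) := by
      rw [countP_change need.keys hnd
          (fun w => decide (need.getD w 0 ≤ cnt.getD w 0))
          (fun w => decide (need.getD w 0 ≤ (cnt.modify x 0 (· + 1)).getD w 0)) x
          (by intro u hu hux; simp only []; rw [PySem.Dict.getD_modify, if_neg hux])]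
      rw [← hs, if_pos hx]
      simp only [beq_iff_eq, PySem.Dict.getD_modify_self, decide_eq_true_eq]
      split_ifs <;> omega
    simp only [altAdd, hc, if_true]
    split_ifs with hb
    · exact ⟨hkeys, hpt, by rw [← hsat, if_pos hb]⟩
    · exact ⟨hkeys, hpt, by rw [← hsat, if_neg hb]⟩
  · have hx : x ∉ need.keys := fun hm => hc ((PySem.Dict.contains_iff_mem_keys cnt x).mpr (hk ▸ hm))
    simp only [altAdd, hc, Bool.false_eq_true, if_false]
    refine ⟨hk, ?_, hs⟩
    intro w hwk
    rw [PySem.Dict.getD_modify, if_neg (by rintro rfl; exact hx hwk)]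
    exact hw w hwk

lemma sub_rel (need cc cnt : PySem.Dict String Int) (sat : Int) (y : String)
    (hnd : need.keys.Nodup) (h : SWInv need cc cnt sat) :
    SWInv need
      (if (cc.modify y 0 (· - 1)).getD y 0 == 0 then (cc.modify y 0 (· - 1)).erase y
       else cc.modify y 0 (· - 1))
      (altRemove need (cnt, sat) y).1 (altRemove need (cnt, sat) y).2 := by
  obtain ⟨hk, hw, hs⟩ := h
  by_cases hc : cnt.contains y = true
  case pos =>
    have hy : y ∈ need.keys := hk ▸ (PySem.Dict.contains_iff_mem_keys cnt y).mp hc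
    have hkeys : (cnt.modify y 0 (· - 1)).keys = need.keys := by
      rw [PySem.Dict.keys_modify, PySem.Dict.keys_insert_of_contains _ _ hc, hk]
    have hpt : ∀ w ∈ need.keys,
        (if (cc.modify y 0 (· - 1)).getD y 0 == 0 then (cc.modify y 0 (· - 1)).erase y
         else cc.modify y 0 (· - 1)).getD w 0 = (cnt.modify y 0 (· - 1)).getD w 0 := by
      intro w hwk
      have base : (cc.modify y 0 (· - 1)).getD w 0 = (cnt.modify y 0 (· - 1)).getD w 0 := by
        rw [PySem.Dict.getD_modify, PySem.Dict.getD_modify]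
        split_ifs with he
        · rw [hw y hy]
        · exact hw w hwk
      split_ifs with hz
      · rw [getD_erase]
        split_ifs with hwy
        · subst hwy; rw [← base, beq_iff_eq.mp hz]
        · exact base
      · exact base
    have hsat : ((if cnt.getD y 0 == need.getD y 0 then sat - 1 else sat) : Int)
        = (need.keys.countP (fun w => decide (need.getD w 0 ≤ (cnt.modify y 0 (· - 1)).getD w 0)) : Int) := by
      rw [countP_change need.keys hnd
          (fun w => decide (need.getD w 0 ≤ cnt.getD w 0))
          (fun w => decide (need.getD w 0 ≤ (cnt.modify y 0 (· - 1)).getD w 0)) y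
          (by intro u hu huy; simp only []; rw [PySem.Dict.getD_modify, if_neg huy])]
      rw [← hs, if_pos hy]
      simp only [beq_iff_eq, PySem.Dict.getD_modify_self, decide_eq_true_eq]
      split_ifs <;> omega
    simp only [altRemove, hc, if_true]
    exact ⟨hkeys, hpt, hsat⟩
  case neg =>
    have hy : y ∉ need.keys := fun hm => hc ((PySem.Dict.contains_iff_mem_keys cnt y).mpr (hk ▸ hm))
    simp only [altRemove, hc, Bool.false_eq_true, if_false]
    refine ⟨hk, ?_, hs⟩
    intro w hwk
    have hwy : w ≠ y := by rintro rfl; exact hy hwk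
    have base : (cc.modify y 0 (· - 1)).getD w 0 = cnt.getD w 0 := by
      rw [PySem.Dict.getD_modify, if_neg hwy]; exact hw w hwk
    split_ifs with hz
    · rw [getD_erase, if_neg hwy]; exact base
    · exact base

lemma check_rel (need cc cnt : PySem.Dict String Int) (sat : Int)
    (h : SWInv need cc cnt sat) :
    (need.keys.all (fun w => decide (need.getD w 0 ≤ cc.getD w 0))) = (sat == (need.size : Int)) := by
  obtain ⟨hk, hw, hs⟩ := h
  have hlen : need.keys.length = need.size := by
    simp [PySem.Dict.keys, PySem.Dict.size]
  rw [Bool.eq_iff_iff, List.all_eq_true, beq_iff_eq, hs]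
  have hcong : need.keys.countP (fun w => decide (need.getD w 0 ≤ cc.getD w 0))
      = need.keys.countP (fun w => decide (need.getD w 0 ≤ cnt.getD w 0)) :=
    List.countP_congr (fun u hu => by rw [hw u hu])
  constructor
  · intro hall
    have : need.keys.countP (fun w => decide (need.getD w 0 ≤ cc.getD w 0)) = need.keys.length :=
      List.countP_eq_length.mpr hall
    rw [hcong] at this
    rw [this, hlen]
  · intro heq
    have : need.keys.countP (fun w => decide (need.getD w 0 ≤ cnt.getD w 0)) = need.keys.length := by
      rw [← hlen] at heq
      exact_mod_cast heq
    intro w hwk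
    rw [hw w hwk]
    exact List.countP_eq_length.mp this w hwk

-- the initial window: A's Counter-building fold and B's add-fold stay related
lemma fold_add_rel (need : PySem.Dict String Int) (hnd : need.keys.Nodup) :
    ∀ (l : List String) (cc cnt : PySem.Dict String Int) (sat : Int),
      SWInv need cc cnt sat →
      SWInv need (l.foldl (fun d x => d.modify x 0 (· + 1)) cc)
        (l.foldl (altAdd need) (cnt, sat)).1 (l.foldl (altAdd need) (cnt, sat)).2 := by
  intro l
  induction l with
  | nil => intro cc cnt sat h; exact h
  | cons a l ih =>
    intro cc cnt sat h
    have h1 := add_rel need cc cnt sat a hnd h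
    simpa using ih (cc.modify a 0 (· + 1)) (altAdd need (cnt, sat) a).1
      (altAdd need (cnt, sat) a).2 h1

-- the sliding loop: equal answers in, equal answers out
lemma loop_rel (need : PySem.Dict String Int) (discount : List String) (hnd : need.keys.Nodup) :
    ∀ (is : List Int) (ans : Int) (cc cnt : PySem.Dict String Int) (sat : Int),
      SWInv need cc cnt sat →
      (is.foldl (aStep need discount) (ans, cc)).1
        = (is.foldl (bStep need (need.size : Int) discount) (ans, (cnt, sat))).1 := by
  intro is
  induction is with
  | nil => intro ans cc cnt sat _; rfl
  | cons i is ih =>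
    intro ans cc cnt sat h
    have h1 := add_rel need cc cnt sat (PySem.List.pyGetD discount i "") hnd h
    have h2 := sub_rel need (cc.modify (PySem.List.pyGetD discount i "") 0 (· + 1))
      (altAdd need (cnt, sat) (PySem.List.pyGetD discount i "")).1
      (altAdd need (cnt, sat) (PySem.List.pyGetD discount i "")).2
      (PySem.List.pyGetD discount (i - 10) "") hnd h1
    have hchk := check_rel need _ _ _ h2
    have hans : (aStep need discount (ans, cc) i).1
        = (bStep need (need.size : Int) discount (ans, (cnt, sat)) i).1 := by
      simp only [aStep, bStep]
      rw [hchk]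
      split_ifs <;> simp
    have hA2 : (aStep need discount (ans, cc) i).2
        = (if ((cc.modify (PySem.List.pyGetD discount i "") 0 (· + 1)).modify
              (PySem.List.pyGetD discount (i - 10) "") 0 (· - 1)).getD
              (PySem.List.pyGetD discount (i - 10) "") 0 == 0 then
            ((cc.modify (PySem.List.pyGetD discount i "") 0 (· + 1)).modify
              (PySem.List.pyGetD discount (i - 10) "") 0 (· - 1)).erase
              (PySem.List.pyGetD discount (i - 10) "")
          else (cc.modify (PySem.List.pyGetD discount i "") 0 (· + 1)).modify
              (PySem.List.pyGetD discount (i - 10) "") 0 (· - 1)) := by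
      simp only [aStep]
      split_ifs <;> rfl
    have h2' : SWInv need (aStep need discount (ans, cc) i).2
        (bStep need (need.size : Int) discount (ans, (cnt, sat)) i).2.1
        (bStep need (need.size : Int) discount (ans, (cnt, sat)) i).2.2 := by
      rw [hA2]; exact h2
    have hmain := ih (aStep need discount (ans, cc) i).1 (aStep need discount (ans, cc) i).2
      (bStep need (need.size : Int) discount (ans, (cnt, sat)) i).2.1
      (bStep need (need.size : Int) discount (ans, (cnt, sat)) i).2.2 h2'
    simp only [List.foldl_cons]
    rw [show (aStep need discount (ans, cc) i) = ((aStep need discount (ans, cc) i).1, (aStep need discount (ans, cc) i).2) from rfl]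
    rw [show (bStep need (need.size : Int) discount (ans, (cnt, sat)) i)
        = ((bStep need (need.size : Int) discount (ans, (cnt, sat)) i).1,
           ((bStep need (need.size : Int) discount (ans, (cnt, sat)) i).2.1,
            (bStep need (need.size : Int) discount (ans, (cnt, sat)) i).2.2)) from rfl]
    rw [← hans]
    exact hmain

-- the starting states (empty window) are related
lemma base_rel (need : PySem.Dict String Int) (hnd : need.keys.Nodup) :
    SWInv need PySem.Dict.empty
      (need.keys.foldl (fun d w => d.insert w (0 : Int)) PySem.Dict.empty)
      ((need.keys.filter (fun w => decide (need.getD w 0 ≤ 0))).length : Int) := by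
  have hz : ∀ (l : List String) (d : PySem.Dict String Int), (∀ w, d.getD w 0 = 0) →
      ∀ w, (l.foldl (fun d w => d.insert w (0 : Int)) d).getD w 0 = 0 := by
    intro l
    induction l with
    | nil => intro d hd w; exact hd w
    | cons a l ih =>
      intro d hd w
      refine ih (d.insert a 0) ?_ w
      intro u
      rw [PySem.Dict.getD_insert]
      split_ifs with h
      · rfl
      · exact hd u
  have hz0 : ∀ w, (need.keys.foldl (fun d w => d.insert w (0 : Int)) PySem.Dict.empty).getD w 0 = 0 :=
    hz need.keys PySem.Dict.empty (fun w => by rw [PySem.Dict.getD_empty])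
  refine ⟨?_, ?_, ?_⟩
  · rw [PySem.Dict.keys_foldl_insert need.keys (fun _ _ => (0 : Int)) PySem.Dict.empty,
      PySem.Dict.keys_empty, PySem.Set.update_nil_left,
      PySem.Set.ofList_eq_self_of_nodup need.keys hnd]
  · intro w _
    rw [PySem.Dict.getD_empty, hz0 w]
  · have hcong : need.keys.countP
        (fun w => decide (need.getD w 0 ≤ (need.keys.foldl (fun d w => PySem.Dict.insert d w (0 : Int)) PySem.Dict.empty).getD w 0))
        = need.keys.countP (fun w => decide (need.getD w 0 ≤ 0)) :=
      List.countP_congr (fun u _ => by rw [hz0 u])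
    rw [hcong, List.countP_eq_length_filter]

-- ===== VERDICT (by name: the statement is the Claim_ definition above) =====
theorem solution_spec : Claim_equal_solution := by
  intro want number discount _
  unfold Spec_solution
  simp only [solution, solution_alt]
  have hnd : ((want.zip number).foldl (fun d p => d.insert p.1 p.2) PySem.Dict.empty).keys.Nodup :=
    PySem.Dict.nodup_keys_foldl_insert_key (want.zip number) (fun p => p.1) (fun _ p => p.2)
      PySem.Dict.empty PySem.Dict.nodup_keys_empty
  have hbase := base_rel _ hnd
  have hwin := fold_add_rel _ hnd (PySem.List.slice discount none (some 10)) _ _ _ hbase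
  rw [← PySem.Dict.counter_eq_foldl] at hwin
  have hchk0 := check_rel _ _ _ _ hwin
  rw [hchk0]
  exact loop_rel _ discount hnd (PySem.List.pyRange 10 discount.length 1) _ _ _ _ hwin
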